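-- pv_equiv track=rewrite | github.com/hwayeon351/Programmers-Algorithms | level3_자물쇠와열쇠.py | lotate_key
-- ===== SOURCE A (Python) =====
-- def lotate_key(key):
--     keys = []
--     keys.append(key)
--     #1.
--     new_key = []
--     for i in range(0, len(key)):
--         row = []
--         for j in range(len(key)-1, -1, -1):
--             row.append(key[j][i])
--         new_key.append(row)
--     keys.append(new_key)
--
--     #2.
--     new_key = []
--     for i in range(len(key)-1, -1, -1):
--         row = []
--         for j in range(len(key)-1, -1, -1):
--             row.append(key[i][j])
--         new_key.append(row)
--     keys.append(new_key)
--
--     #3.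
--     new_key = []
--     for i in range(len(key)-1, -1, -1):
--         row = []
--         for j in range(len(key)):
--             row.append(key[j][i])
--         new_key.append(row)
--     keys.append(new_key)
--     return keys
-- ===== SOURCE B (Python) =====
-- def lotate_key(key):
--     def rot90(m):
--         n = len(m)
--         return [[m[n - 1 - j][i] for j in range(n)] for i in range(n)]
--
--     keys = [key]
--     for _ in range(3):
--         keys.append(rot90(keys[-1]))
--     return keys
-- ===== Notes on version B (the rewrite author's own statement) =====
-- stated objective: simpler
-- what changed: B defines one 90-degree-clockwise rotation helper and applies it three times, each rotation derived from the previous one, instead of A's three separately hand-written double loops with distinct index/range formulas.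
import Mathlib
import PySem

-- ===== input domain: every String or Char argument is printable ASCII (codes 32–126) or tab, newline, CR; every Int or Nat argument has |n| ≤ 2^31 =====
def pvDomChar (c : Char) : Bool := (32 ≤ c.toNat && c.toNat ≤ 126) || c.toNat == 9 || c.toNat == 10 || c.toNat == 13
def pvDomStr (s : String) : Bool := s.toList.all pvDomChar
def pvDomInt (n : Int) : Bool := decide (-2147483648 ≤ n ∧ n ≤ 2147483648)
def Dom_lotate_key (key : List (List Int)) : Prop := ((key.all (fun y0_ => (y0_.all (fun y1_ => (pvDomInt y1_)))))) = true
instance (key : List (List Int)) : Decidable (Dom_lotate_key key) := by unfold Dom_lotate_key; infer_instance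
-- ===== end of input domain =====

-- B replaces A's three hand-written index-formula blocks by one 90°-rotation helper applied
-- three times, each rotation derived from the previous one (objective: simpler).

-- ===== PORT A =====
-- literal transliteration of A: three separate blocks, each with its own range directions
-- and index formula (n = len(key) inlined as PySem.List.len key)
def lotate_key (key : List (List Int)) : List (List (List Int)) :=
  [key,
   -- #1: for i in range(0, n): for j in range(n-1, -1, -1): row.append(key[j][i])
   (PySem.List.pyRange 0 (PySem.List.len key) 1).map (fun i =>
      (PySem.List.pyRange (PySem.List.len key - 1) (-1) (-1)).map (fun j =>
        PySem.List.pyGetD (PySem.List.pyGetD key j []) i 0)),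
   -- #2: for i in range(n-1, -1, -1): for j in range(n-1, -1, -1): row.append(key[i][j])
   (PySem.List.pyRange (PySem.List.len key - 1) (-1) (-1)).map (fun i =>
      (PySem.List.pyRange (PySem.List.len key - 1) (-1) (-1)).map (fun j =>
        PySem.List.pyGetD (PySem.List.pyGetD key i []) j 0)),
   -- #3: for i in range(n-1, -1, -1): for j in range(n): row.append(key[j][i])
   (PySem.List.pyRange (PySem.List.len key - 1) (-1) (-1)).map (fun i =>
      (PySem.List.pyRange 0 (PySem.List.len key) 1).map (fun j =>
        PySem.List.pyGetD (PySem.List.pyGetD key j []) i 0))]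

-- ===== PORT B =====
-- helper of B: one 90° clockwise rotation, new[i][j] = m[n-1-j][i]
def pvRot90 (m : List (List Int)) : List (List Int) :=
  (PySem.List.pyRange 0 (PySem.List.len m) 1).map (fun i =>
    (PySem.List.pyRange 0 (PySem.List.len m) 1).map (fun j =>
      PySem.List.pyGetD (PySem.List.pyGetD m (PySem.List.len m - 1 - j) []) i 0))

-- keys = [key]; for _ in range(3): keys.append(rot90(keys[-1]))
def lotate_key_alt (key : List (List Int)) : List (List (List Int)) :=
  (PySem.List.pyRange 0 3 1).foldl
    (fun keys _ => keys ++ [pvRot90 (PySem.List.pyGetD keys (-1) [])]) [key]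

-- ===== PRECONDITION & SPEC =====
-- Pre_ excludes exactly the inputs on which the Python A raises IndexError:
-- some row shorter than the number of rows (both A and B raise there).
def Pre_lotate_key (key : List (List Int)) : Prop :=
  ∀ row ∈ key, key.length ≤ row.length
instance (key : List (List Int)) : Decidable (Pre_lotate_key key) := by
  unfold Pre_lotate_key; infer_instance
def pvWitness_lotate_key : List (List Int) := [[1, 2], [3, 4]]

def Spec_lotate_key (key : List (List Int)) (out : List (List (List Int))) : Prop := out = lotate_key_alt key
instance (key : List (List Int)) (out : List (List (List Int))) : Decidable (Spec_lotate_key key out) := by unfold Spec_lotate_key; infer_instance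

-- ===== CLAIM (what is proved, stated in full; the proofs are below) =====
def Claim_equal_lotate_key : Prop := ∀ (key : List (List Int)), Dom_lotate_key key → Pre_lotate_key key → Spec_lotate_key key (lotate_key key)

-- ===== LEMMAS AND PROOFS =====

-- canonical matrix entry with Python-style defaults
def pvE (key : List (List Int)) (i j : Nat) : Int := (key.getD i []).getD j 0

lemma pv_descRange (n : Nat) :
    PySem.List.pyRange ((n : Int) - 1) (-1) (-1)
      = (List.range n).map (fun k : Nat => (n : Int) - 1 - (k : Int)) := by
  rw [PySem.List.pyRange_neg_one]
  have : ((n : Int) - 1 - -1).toNat = n := by omega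
  rw [this]

lemma pv_entry_cast (key : List (List Int)) (a b : Int) (i j : Nat)
    (ha : a = (i : Int)) (hb : b = (j : Int)) :
    PySem.List.pyGetD (PySem.List.pyGetD key a []) b 0 = pvE key i j := by
  subst ha; subst hb
  simp [PySem.List.pyGetD_natCast, pvE]

lemma pv_rot90_eq (m : List (List Int)) :
    pvRot90 m = (List.range m.length).map (fun i =>
      (List.range m.length).map (fun j => pvE m (m.length - 1 - j) i)) := by
  unfold pvRot90
  simp only [PySem.List.len_eq, PySem.List.pyRange_zero_natCast, List.map_map]
  refine List.map_congr_left (fun i hi => ?_)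
  simp only [Function.comp_apply]
  refine List.map_congr_left (fun j hj => ?_)
  simp only [Function.comp_apply]
  have hj : j < m.length := List.mem_range.mp hj
  exact pv_entry_cast m _ _ _ _ (by omega) rfl

lemma pv_len_rot90 (m : List (List Int)) : (pvRot90 m).length = m.length := by
  rw [pv_rot90_eq]; simp

lemma pv_pvE_rot90 (m : List (List Int)) (i j : Nat)
    (hi : i < m.length) (hj : j < m.length) :
    pvE (pvRot90 m) i j = pvE m (m.length - 1 - j) i := by
  rw [pv_rot90_eq]
  simp [pvE, List.getD_eq_getElem?_getD, hi, hj]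

lemma pv_block1 (key : List (List Int)) :
    ((PySem.List.pyRange 0 (PySem.List.len key) 1).map (fun i =>
      (PySem.List.pyRange (PySem.List.len key - 1) (-1) (-1)).map (fun j =>
        PySem.List.pyGetD (PySem.List.pyGetD key j []) i 0)))
    = (List.range key.length).map (fun i =>
        (List.range key.length).map (fun j => pvE key (key.length - 1 - j) i)) := by
  simp only [PySem.List.len_eq, PySem.List.pyRange_zero_natCast, pv_descRange, List.map_map]
  refine List.map_congr_left (fun i hi => ?_)
  simp only [Function.comp_apply]
  refine List.map_congr_left (fun j hj => ?_)
  simp only [Function.comp_apply]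
  have hj : j < key.length := List.mem_range.mp hj
  exact pv_entry_cast key _ _ _ _ (by omega) rfl

lemma pv_block2 (key : List (List Int)) :
    ((PySem.List.pyRange (PySem.List.len key - 1) (-1) (-1)).map (fun i =>
      (PySem.List.pyRange (PySem.List.len key - 1) (-1) (-1)).map (fun j =>
        PySem.List.pyGetD (PySem.List.pyGetD key i []) j 0)))
    = (List.range key.length).map (fun i =>
        (List.range key.length).map (fun j =>
          pvE key (key.length - 1 - i) (key.length - 1 - j))) := by
  simp only [PySem.List.len_eq, pv_descRange, List.map_map]
  refine List.map_congr_left (fun i hi => ?_)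
  simp only [Function.comp_apply]
  refine List.map_congr_left (fun j hj => ?_)
  simp only [Function.comp_apply]
  have hi : i < key.length := List.mem_range.mp hi
  have hj : j < key.length := List.mem_range.mp hj
  exact pv_entry_cast key _ _ _ _ (by omega) (by omega)

lemma pv_block3 (key : List (List Int)) :
    ((PySem.List.pyRange (PySem.List.len key - 1) (-1) (-1)).map (fun i =>
      (PySem.List.pyRange 0 (PySem.List.len key) 1).map (fun j =>
        PySem.List.pyGetD (PySem.List.pyGetD key j []) i 0)))
    = (List.range key.length).map (fun i =>
        (List.range key.length).map (fun j => pvE key j (key.length - 1 - i))) := by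
  simp only [PySem.List.len_eq, PySem.List.pyRange_zero_natCast, pv_descRange, List.map_map]
  refine List.map_congr_left (fun i hi => ?_)
  simp only [Function.comp_apply]
  refine List.map_congr_left (fun j hj => ?_)
  simp only [Function.comp_apply]
  have hi : i < key.length := List.mem_range.mp hi
  exact pv_entry_cast key _ _ _ _ rfl (by omega)

lemma pv_rot2 (key : List (List Int)) :
    pvRot90 (pvRot90 key)
      = (List.range key.length).map (fun i =>
          (List.range key.length).map (fun j =>
            pvE key (key.length - 1 - i) (key.length - 1 - j))) := by
  rw [pv_rot90_eq, pv_len_rot90]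
  refine List.map_congr_left (fun i hi => ?_)
  refine List.map_congr_left (fun j hj => ?_)
  have hi : i < key.length := List.mem_range.mp hi
  have hj : j < key.length := List.mem_range.mp hj
  rw [pv_pvE_rot90 key (key.length - 1 - j) i (by omega) hi]

lemma pv_rot3 (key : List (List Int)) :
    pvRot90 (pvRot90 (pvRot90 key))
      = (List.range key.length).map (fun i =>
          (List.range key.length).map (fun j => pvE key j (key.length - 1 - i))) := by
  have h2 : (pvRot90 (pvRot90 key)).length = key.length := by
    rw [pv_len_rot90, pv_len_rot90]
  rw [pv_rot90_eq, h2]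
  refine List.map_congr_left (fun i hi => ?_)
  refine List.map_congr_left (fun j hj => ?_)
  have hi : i < key.length := List.mem_range.mp hi
  have hj : j < key.length := List.mem_range.mp hj
  rw [pv_rot2]
  have h1j : key.length - 1 - j < key.length := by omega
  simp only [pvE, List.getD_eq_getElem?_getD, List.getElem?_map, List.getElem?_range,
    h1j, hi, Option.map_some, Option.getD_some]
  have hjj : key.length - 1 - (key.length - 1 - j) = j := by omega
  rw [hjj]

lemma pv_alt_unfold (key : List (List Int)) :
    lotate_key_alt key
      = [key, pvRot90 key, pvRot90 (pvRot90 key), pvRot90 (pvRot90 (pvRot90 key))] := by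
  unfold lotate_key_alt
  have h3 : PySem.List.pyRange 0 3 1 = [0, 1, 2] := by decide
  rw [h3]
  simp only [List.foldl_cons, List.foldl_nil]
  rw [show ([key] : List (List (List Int))) = [] ++ [key] from rfl,
      PySem.List.pyGetD_neg_one_append_singleton]
  rw [show ([] ++ [key] ++ [pvRot90 key] : List (List (List Int)))
        = [key] ++ [pvRot90 key] from rfl,
      PySem.List.pyGetD_neg_one_append_singleton]
  rw [show ([key] ++ [pvRot90 key] ++ [pvRot90 (pvRot90 key)] : List (List (List Int)))
        = [key, pvRot90 key] ++ [pvRot90 (pvRot90 key)] from rfl,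
      PySem.List.pyGetD_neg_one_append_singleton]
  rfl

-- ===== VERDICT (by name: the statement is the Claim_ definition above) =====
theorem lotate_key_spec : Claim_equal_lotate_key := by
  intro key _ _
  unfold Spec_lotate_key lotate_key
  rw [pv_alt_unfold, pv_rot3, pv_rot2, pv_rot90_eq, pv_block1, pv_block2, pv_block3]
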